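-- pv_equiv track=rewrite | github.com/MattArwenLangham/advent-of-code | 2023_python/day14/parabolic.py | tilt_up
-- ===== SOURCE A (Python) =====
-- movable = 'O'
--
-- immovable = '#'
--
-- def tilt_up(rock_map):
--     sum_load = 0
--     max_load_num = len(rock_map)
--     last_empty_row_in_col = [1 if rock == immovable else 0 for rock in rock_map[0]]
--
--     for row, rock_row in enumerate(rock_map):
--         for col, rock in enumerate(rock_row):
--             if rock == movable:
--                 sum_load += max_load_num - last_empty_row_in_col[col]
--                 last_empty_row_in_col[col] += 1
--             elif rock == immovable:
--                 last_empty_row_in_col[col] = row + 1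
--     return sum_load
-- ===== SOURCE B (Python) =====
-- def tilt_up(rock_map):
--     total = len(rock_map)
--     width = len(rock_map[0])
--     load = 0
--     for col in range(width):
--         start = 0
--         k = 0
--         for row, line in enumerate(rock_map):
--             c = line[col] if col < len(line) else '.'
--             if c == 'O':
--                 k += 1
--             elif c == '#':
--                 load += k * (total - start) - k * (k - 1) // 2
--                 start = row + 1
--                 k = 0
--         load += k * (total - start) - k * (k - 1) // 2
--     return load
-- ===== Notes on version B (the rewrite author's own statement) =====
-- stated objective: alternative
-- what changed: B is column-major and adds each '#'-separated run's load via the closed form k*(total-start) - k*(k-1)//2, replacing A's rock-by-rock simulation with its maintained per-column last-empty-row array.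
import Mathlib
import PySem

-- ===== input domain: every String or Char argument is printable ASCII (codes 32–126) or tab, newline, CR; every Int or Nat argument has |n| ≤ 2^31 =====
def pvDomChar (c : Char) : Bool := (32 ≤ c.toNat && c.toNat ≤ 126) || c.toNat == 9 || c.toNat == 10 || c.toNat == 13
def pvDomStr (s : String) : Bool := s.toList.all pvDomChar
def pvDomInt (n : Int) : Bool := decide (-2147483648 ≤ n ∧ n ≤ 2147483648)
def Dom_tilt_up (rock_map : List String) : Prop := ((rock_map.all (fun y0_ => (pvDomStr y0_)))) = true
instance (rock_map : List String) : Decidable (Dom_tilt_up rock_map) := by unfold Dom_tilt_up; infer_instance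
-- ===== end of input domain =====

set_option maxRecDepth 8192


-- B replaces A's row-major rock-by-rock simulation by a column-major scan that adds each
-- '#'-separated run's load in closed form; equal on A's whole return domain (Pre_).

-- ===== PORT A =====
-- inner loop: 'for col, rock in enumerate(rock_row)' with state (sum_load, last_empty_row_in_col)
def tiltRowA (n row : Int) (col : Nat) (acc : Int) (vec : List Int) : List Char → Int × List Int
  | [] => (acc, vec)
  | c :: cs =>
    if c = 'O' then
      tiltRowA n row (col + 1) (acc + (n - vec.getD col 0)) (vec.set col (vec.getD col 0 + 1)) cs
    else if c = '#' then
      tiltRowA n row (col + 1) acc (vec.set col (row + 1)) cs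
    else
      tiltRowA n row (col + 1) acc vec cs

-- outer loop: 'for row, rock_row in enumerate(rock_map)'
def tiltRowsA (n : Int) (row : Int) (acc : Int) (vec : List Int) : List String → Int
  | [] => acc
  | s :: rest =>
    let p := tiltRowA n row 0 acc vec s.toList
    tiltRowsA n (row + 1) p.1 p.2 rest

def tilt_up (rock_map : List String) : Int :=
  let n : Int := rock_map.length
  -- rock_map[0] (IndexError on empty is excluded by Pre_)
  let vec0 : List Int := (rock_map.headD "").toList.map (fun c => if c = '#' then 1 else 0)
  tiltRowsA n 0 0 vec0 rock_map

-- ===== PORT B =====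
-- inner loop: 'for row, line in enumerate(rock_map)' with state (start, k, load)
def tiltColB (total : Int) (col : Nat) (row start k load : Int) : List String → Int × Int × Int
  | [] => (start, k, load)
  | line :: rest =>
    let c : Char := if col < line.toList.length then line.toList.getD col '.' else '.'
    if c = 'O' then
      tiltColB total col (row + 1) start (k + 1) load rest
    else if c = '#' then
      tiltColB total col (row + 1) (row + 1) 0
        (load + (k * (total - start) - PySem.Int.floordiv (k * (k - 1)) 2)) rest
    else
      tiltColB total col (row + 1) start k load rest

def tilt_up_alt (rock_map : List String) : Int :=
  let total : Int := rock_map.length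
  let width : Nat := (rock_map.headD "").toList.length   -- len(rock_map[0])
  (List.range width).foldl (fun load col =>
    let st := tiltColB total col 0 0 0 load rock_map
    st.2.2 + (st.2.1 * (total - st.1) - PySem.Int.floordiv (st.2.1 * (st.2.1 - 1)) 2)) 0

-- ===== PRECONDITION & SPEC =====
-- Pre_ excludes exactly the inputs where A raises IndexError: the empty map (rock_map[0]),
-- and ragged maps with an 'O' or '#' beyond the first row's width (last_empty_row_in_col[col]).
def Pre_tilt_up (rock_map : List String) : Prop :=
  rock_map ≠ [] ∧
  ∀ s ∈ rock_map,
    (s.toList.drop (rock_map.headD "").toList.length).all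
      (fun c => !(c == 'O') && !(c == '#')) = true
instance (rock_map : List String) : Decidable (Pre_tilt_up rock_map) := by
  unfold Pre_tilt_up; infer_instance

def pvWitness_tilt_up : List String := ["O.#", ".O.", "#.O"]

def Spec_tilt_up (rock_map : List String) (out : Int) : Prop := out = tilt_up_alt rock_map
instance (rock_map : List String) (out : Int) : Decidable (Spec_tilt_up rock_map out) := by
  unfold Spec_tilt_up; infer_instance

-- ===== CLAIM (what is proved, stated in full; the proofs are below) =====
def Claim_equal_tilt_up : Prop := ∀ (rock_map : List String), Dom_tilt_up rock_map →
  Pre_tilt_up rock_map → Spec_tilt_up rock_map (tilt_up rock_map)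

-- ===== LEMMAS AND PROOFS =====

-- per-cell effect of A's inner loop on the accumulator and on one column's state
def dAcc (n : Int) (c : Char) (e : Int) : Int := if c = 'O' then n - e else 0
def dVec (row : Int) (c : Char) (e : Int) : Int :=
  if c = 'O' then e + 1 else if c = '#' then row + 1 else e

-- one row's total accumulator delta / new column states, pairing columns positionally
def accRow (n : Int) : List Int → List Char → Int
  | [], _ => 0
  | _ :: _, [] => 0
  | e :: es, c :: cs => dAcc n c e + accRow n es cs

def vecRow (row : Int) : List Int → List Char → List Int
  | [], _ => []
  | es, [] => es
  | e :: es, c :: cs => dVec row c e :: vecRow row es cs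

-- A's effect on a single column, scanned down the rows (cells of that column)
def colA (n r e : Int) : List Char → Int
  | [] => 0
  | c :: rest =>
    if c = 'O' then (n - e) + colA n (r + 1) (e + 1) rest
    else if c = '#' then colA n (r + 1) (r + 1) rest
    else colA n (r + 1) e rest

-- B's pending load of the current run
def pend (t s k : Int) : Int := k * (t - s) - PySem.Int.floordiv (k * (k - 1)) 2

lemma floordiv_two_mul (m : Int) : PySem.Int.floordiv (2 * m) 2 = m := by
  have h := PySem.Int.floordiv_mul_add_mod (2 * m) 2
  have hz : PySem.Int.mod (2 * m) 2 = 0 := by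
    rw [PySem.Int.mod_eq_zero_iff_dvd]; exact ⟨m, rfl⟩
  omega

lemma pend_succ (t s k : Int) : pend t s (k + 1) = pend t s k + (t - (s + k)) := by
  have hE := Int.even_mul_succ_self (k - 1)
  rw [show k - 1 + 1 = k by ring] at hE
  obtain ⟨m, hm⟩ := hE
  have h1 : k * (k - 1) = 2 * m := by rw [mul_comm]; omega
  have h2 : (k + 1) * (k + 1 - 1) = 2 * (m + k) := by linear_combination h1
  unfold pend
  rw [h1, h2, floordiv_two_mul, floordiv_two_mul]
  ring

lemma pend_zero (t s : Int) : pend t s 0 = 0 := by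
  unfold pend
  rw [show (0 : Int) * (0 - 1) = 2 * 0 by ring, floordiv_two_mul]
  ring

lemma vecRow_length (row : Int) (es : List Int) (cs : List Char) :
    (vecRow row es cs).length = es.length := by
  induction es generalizing cs with
  | nil => simp [vecRow]
  | cons e es ih => cases cs with
    | nil => simp [vecRow]
    | cons c cs => simp [vecRow, ih]

lemma vecRow_getD (row : Int) (es : List Int) (cs : List Char) (j : Nat) :
    (vecRow row es cs).getD j 0 = dVec row (cs.getD j '.') (es.getD j 0) ∨
      (es.length ≤ j) := by
  induction es generalizing cs j with
  | nil => right; simp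
  | cons e es ih =>
    cases cs with
    | nil =>
      left; simp only [vecRow]
      have : dVec row (([] : List Char).getD j '.') ((e :: es).getD j 0) = (e :: es).getD j 0 := by
        simp [dVec]
      rw [this]
    | cons c cs =>
      cases j with
      | zero => left; simp [vecRow]
      | succ j =>
        rcases ih cs j with h | h
        · left; simpa [vecRow] using h
        · right; simpa using h

lemma accRow_eq_sum (n : Int) (es : List Int) (cs : List Char) :
    accRow n es cs = ∑ j ∈ Finset.range es.length, dAcc n (cs.getD j '.') (es.getD j 0) := by
  induction es generalizing cs with
  | nil => simp [accRow]
  | cons e es ih =>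
    rw [List.length_cons, Finset.sum_range_succ']
    cases cs with
    | nil => simp [accRow, dAcc]
    | cons c cs =>
      simp only [accRow, ih cs, List.getD_cons_succ, List.getD_cons_zero]
      omega

lemma take_drop_set (vec : List Int) (col : Nat) (h : col < vec.length) (v : Int) :
    (vec.set col v).take (col + 1) = vec.take col ++ [v] ∧
    (vec.set col v).drop (col + 1) = vec.drop (col + 1) := by
  have hlen : (vec.take col).length = col := by simp [Nat.le_of_lt h]
  rw [List.set_eq_take_cons_drop v h]
  constructor
  · rw [List.take_append, hlen, List.take_of_length_le (by omega),
      show col + 1 - col = 1 by omega]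
    simp
  · rw [List.drop_append, hlen, List.drop_eq_nil_of_le (by omega),
      show col + 1 - col = 1 by omega]
    simp

-- A's inner loop, decomposed: the first `col` entries are untouched, the rest pair with the chars
lemma tiltRowA_eq (n row : Int) (cs : List Char) :
    ∀ (vec : List Int) (col : Nat) (acc : Int),
    (∀ c ∈ cs.drop (vec.length - col), c ≠ 'O' ∧ c ≠ '#') →
    tiltRowA n row col acc vec cs =
      (acc + accRow n (vec.drop col) cs, vec.take col ++ vecRow row (vec.drop col) cs) := by
  induction cs with
  | nil =>
    intro vec col acc _
    cases h : vec.drop col with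
    | nil => simp [tiltRowA, accRow, vecRow, ← h]
    | cons e es => simp [tiltRowA, accRow, vecRow, ← h]
  | cons c cs ih =>
    intro vec col acc hinert
    by_cases hcol : col < vec.length
    · have hdrop : vec.drop col = vec[col] :: vec.drop (col + 1) := List.drop_eq_getElem_cons hcol
      have hgetD : vec.getD col 0 = vec[col] := List.getD_eq_getElem vec 0 hcol
      have hnext : ∀ (v : Int), ∀ c' ∈ cs.drop ((vec.set col v).length - (col + 1)), c' ≠ 'O' ∧ c' ≠ '#' := by
        intro v c' hc'
        apply hinert
        have : vec.length - col = (vec.length - (col + 1)) + 1 := by omega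
        rw [this, List.drop_succ_cons]  -- (c :: cs).drop (m+1) = cs.drop m
        simpa using hc'
      have hsame : ∀ c' ∈ cs.drop (vec.length - (col + 1)), c' ≠ 'O' ∧ c' ≠ '#' := by
        intro c' hc'
        apply hinert
        have : vec.length - col = (vec.length - (col + 1)) + 1 := by omega
        rw [this, List.drop_succ_cons]
        exact hc'
      by_cases hO : c = 'O'
      · subst hO
        rw [tiltRowA, if_pos rfl]
        rw [ih _ _ _ (by simpa using hnext (vec.getD col 0 + 1))]
        obtain ⟨ht, hd⟩ := take_drop_set vec col hcol (vec.getD col 0 + 1)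
        rw [ht, hd, hdrop, hgetD]
        rw [Prod.mk.injEq]
        refine ⟨?_, ?_⟩
        · simp [accRow, dAcc]; ring
        · simp [vecRow, dVec]
      · by_cases hH : c = '#'
        · subst hH
          rw [tiltRowA, if_neg (by decide), if_pos rfl]
          rw [ih _ _ _ (by simpa using hnext (row + 1))]
          obtain ⟨ht, hd⟩ := take_drop_set vec col hcol (row + 1)
          rw [ht, hd, hdrop]
          rw [Prod.mk.injEq]
          refine ⟨?_, ?_⟩
          · simp [accRow, dAcc]
          · simp [vecRow, dVec]
        · rw [tiltRowA, if_neg hO, if_neg hH]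
          rw [ih _ _ _ hsame]
          rw [hdrop]
          rw [Prod.mk.injEq]
          refine ⟨?_, ?_⟩
          · simp [accRow, dAcc, hO]
          · have ht1 : vec.take (col + 1) = vec.take col ++ [vec[col]] :=
              List.take_succ_eq_append_getElem hcol
            simp only [vecRow, dVec, if_neg hO, if_neg hH]
            rw [ht1, List.append_assoc, List.singleton_append]
    · -- col beyond the state: every remaining char is inert
      have hdrop : vec.drop col = [] := List.drop_eq_nil_of_le (by omega)
      have hall : ∀ c' ∈ c :: cs, c' ≠ 'O' ∧ c' ≠ '#' := by
        have : vec.length - col = 0 := by omega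
        intro c' hc'; exact hinert c' (by rwa [this, List.drop_zero])
      obtain ⟨hO, hH⟩ := hall c (by simp)
      rw [tiltRowA, if_neg hO, if_neg hH]
      rw [ih _ _ _ (by intro c' hc'; exact hall c' (by exact List.mem_cons_of_mem _ (List.mem_of_mem_drop hc')))]
      have hdrop1 : vec.drop (col + 1) = [] := List.drop_eq_nil_of_le (by omega)
      have htake : vec.take col = vec := List.take_of_length_le (by omega)
      have htake1 : vec.take (col + 1) = vec := List.take_of_length_le (by omega)
      rw [hdrop, hdrop1, htake, htake1]
      simp [accRow, vecRow]

-- A's whole loop as a sum of independent per-column scans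
lemma tiltRowsA_eq (n : Int) (rows : List String) :
    ∀ (r acc : Int) (vec : List Int),
    (∀ s ∈ rows, ∀ c ∈ s.toList.drop vec.length, c ≠ 'O' ∧ c ≠ '#') →
    tiltRowsA n r acc vec rows =
      acc + ∑ j ∈ Finset.range vec.length,
        colA n r (vec.getD j 0) (rows.map (fun s => s.toList.getD j '.')) := by
  induction rows with
  | nil => intro r acc vec _; simp [tiltRowsA, colA]
  | cons s rest ih =>
    intro r acc vec hinert
    rw [tiltRowsA]
    rw [tiltRowA_eq n r s.toList vec 0 acc
      (by simpa using hinert s (by simp))]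
    simp only [List.drop_zero, List.take_zero, List.nil_append]
    have hlen : (vecRow r vec s.toList).length = vec.length := vecRow_length r vec s.toList
    rw [ih (r + 1) _ _ (by
      intro s' hs' c hc
      exact hinert s' (List.mem_cons_of_mem _ hs') c (by rwa [hlen] at hc))]
    rw [hlen, accRow_eq_sum]
    rw [add_assoc, ← Finset.sum_add_distrib]
    congr 1
    apply Finset.sum_congr rfl
    intro j hj
    have hj' : j < vec.length := Finset.mem_range.mp hj
    rcases vecRow_getD r vec s.toList j with h | h
    · rw [h]
      simp only [List.map_cons, colA, dAcc, dVec, List.getD]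
      by_cases hO : s.toList[j]?.getD '.' = 'O'
      · simp [hO]
      · by_cases hH : s.toList[j]?.getD '.' = '#' <;> simp [hO, hH]
    · omega

-- B's per-column loop threads `load` additively and computes colA plus the pending run
lemma tiltColB_eq (t : Int) (col : Nat) (rows : List String) :
    ∀ (r start k load : Int),
    (tiltColB t col r start k load rows).2.2 +
      pend t (tiltColB t col r start k load rows).1 (tiltColB t col r start k load rows).2.1 =
    load + pend t start k + colA t r (start + k) (rows.map (fun s => s.toList.getD col '.')) := by
  induction rows with
  | nil => intro r start k load; simp [tiltColB, colA]
  | cons line rest ih =>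
    intro r start k load
    have hc : (if col < line.toList.length then line.toList.getD col '.' else '.') =
        line.toList.getD col '.' := by
      split
      · rfl
      · rw [List.getD_eq_default]; omega
    rw [tiltColB]
    simp only [hc, List.map_cons]
    by_cases hO : line.toList.getD col '.' = 'O'
    · rw [hO, if_pos rfl, ih]
      simp only [colA]
      rw [if_pos trivial, pend_succ, show start + (k + 1) = start + k + 1 from by ring]
      ring
    · by_cases hH : line.toList.getD col '.' = '#'
      · rw [hH, if_neg (by decide), if_pos rfl, ih]
        simp only [colA]
        rw [if_neg (by decide : ¬('#' : Char) = 'O'), if_pos trivial, pend_zero,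
          show r + 1 + (0 : Int) = r + 1 from by ring]
        simp only [pend]
        ring
      · rw [if_neg hO, if_neg hH, ih]
        simp only [colA]
        rw [if_neg hO, if_neg hH]

-- B's outer fold over the columns is the sum of the per-column loads
lemma tilt_up_alt_eq_sum (rock_map : List String) :
    tilt_up_alt rock_map =
      ∑ j ∈ Finset.range (rock_map.headD "").toList.length,
        colA (rock_map.length) 0 0 (rock_map.map (fun s => s.toList.getD j '.')) := by
  unfold tilt_up_alt
  simp only []
  generalize (rock_map.headD "").toList.length = w
  induction w with
  | zero => simp
  | succ w ihw =>
    rw [List.range_succ, List.foldl_append, ihw, Finset.sum_range_succ, List.foldl_cons,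
      List.foldl_nil]
    have h := tiltColB_eq (rock_map.length) w rock_map 0 0 0
      (∑ j ∈ Finset.range w, colA (rock_map.length) 0 0 (rock_map.map (fun s => s.toList.getD j '.')))
    rw [pend_zero, show (0 : Int) + 0 = 0 from by norm_num] at h
    simp only [pend] at h
    omega

-- the head-row init of A's last_empty array is absorbed by A's own processing of row 0
lemma colA_init (n : Int) (c : Char) (cells : List Char) :
    colA n 0 (if c = '#' then 1 else 0) (c :: cells) = colA n 0 0 (c :: cells) := by
  by_cases hO : c = 'O'
  · simp [colA, hO]
  · by_cases hH : c = '#' <;> simp [colA, hO, hH]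

-- ===== VERDICT (by name: the statement is the Claim_ definition above) =====
theorem tilt_up_spec : Claim_equal_tilt_up := by
  intro rock_map _ hpre
  obtain ⟨hne, hragged⟩ := hpre
  unfold Spec_tilt_up
  obtain ⟨s0, rest, rfl⟩ : ∃ s0 rest, rock_map = s0 :: rest := by
    cases rock_map with
    | nil => exact absurd rfl hne
    | cons a l => exact ⟨a, l, rfl⟩
  rw [tilt_up_alt_eq_sum]
  show tilt_up (s0 :: rest) = _
  unfold tilt_up
  simp only [List.headD_cons] at hragged ⊢
  rw [tiltRowsA_eq _ _ _ _ _ (by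
    intro s hs c hc
    have h1 := hragged s hs
    rw [List.all_eq_true] at h1
    have h2 := h1 c (by simpa using hc)
    simp only [Bool.and_eq_true, Bool.not_eq_true', beq_eq_false_iff_ne] at h2
    exact h2)]
  rw [List.length_map]
  rw [zero_add]
  apply Finset.sum_congr rfl
  intro j hj
  have hj' : j < s0.toList.length := Finset.mem_range.mp hj
  have hinit : (s0.toList.map (fun c => if c = '#' then (1 : Int) else 0)).getD j 0 =
      (if s0.toList.getD j '.' = '#' then (1 : Int) else 0) := by
    rw [List.getD_eq_getElem _ _ (by simpa using hj'), List.getElem_map,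
      List.getD_eq_getElem _ _ hj']
  rw [hinit]
  simp only [List.map_cons]
  exact colA_init _ _ _
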